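-- pv_equiv track=rewrite | github.com/TimothySjiang/leetcodepy | productSum.py | productSum
-- ===== SOURCE A (Python) =====
-- def productSum(number):
--     total, prod = 0,1
--     number = abs(number)
--     while number:
--         last = number % 10
--         number //= 10
--         prod *= last
--         total += last
--
--     return prod - total
-- ===== SOURCE B (Python) =====
-- import math
--
-- def productSum(number):
--     digits = [int(c) for c in str(abs(number))]
--     return math.prod(digits) - sum(digits)
-- ===== Notes on version B (the rewrite author's own statement) =====
-- stated objective: simpler
-- what changed: B extracts the digits via the decimal string representation str(abs(number)) instead of A's arithmetic %/// loop, then takes math.prod(digits) - sum(digits).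
-- intended difference: For number == 0, A's loop never runs and it returns its initial prod - total = 1, while B sees the digit list [0] and returns 0, the actual product-minus-sum of the digits of 0. — e.g. on productSum(0): A returns 1, B returns 0
import Mathlib
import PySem

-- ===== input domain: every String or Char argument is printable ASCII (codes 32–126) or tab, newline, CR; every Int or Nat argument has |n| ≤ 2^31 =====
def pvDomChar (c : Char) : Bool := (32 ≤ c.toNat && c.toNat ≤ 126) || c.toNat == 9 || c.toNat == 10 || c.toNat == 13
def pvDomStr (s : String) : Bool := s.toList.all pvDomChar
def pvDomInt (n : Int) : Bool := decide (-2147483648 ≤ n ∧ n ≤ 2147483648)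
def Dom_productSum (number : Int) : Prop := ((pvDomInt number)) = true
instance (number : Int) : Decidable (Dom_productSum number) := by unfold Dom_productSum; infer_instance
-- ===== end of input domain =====

-- B extracts digits from the decimal string instead of A's %/// loop (simpler); at number = 0 B returns the digit-list value 0 where A's empty loop returns 1 (stated as D_).

-- ===== PORT A =====
-- A's while loop: number = abs(number) is nonnegative, so Python's % and // agree
-- with Nat's % and / on number.natAbs; the loop is the obvious recursion on it.
def productSumLoopA (m : Nat) (total prod : Int) : Int :=
  if m = 0 then prod - total
  else productSumLoopA (m / 10) (total + (m % 10 : Nat)) (prod * (m % 10 : Nat))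
decreasing_by exact Nat.div_lt_self (Nat.pos_of_ne_zero (by assumption)) (by norm_num)

def productSum (number : Int) : Int := productSumLoopA number.natAbs 0 1

-- ===== PORT B =====
-- digits = [int(c) for c in str(abs(number))]: str → PySem.Int.toChars; int(c) on a
-- decimal digit character is exactly (c.toNat : Int) - 48 (exact: str of a nonnegative
-- int yields only '0'..'9').
-- math.prod(digits) - sum(digits) via the library reductions List.prod / List.sum.
def pvBDigits (number : Int) : List Int :=
  (PySem.Int.toChars ((number.natAbs : Int))).map (fun c => (c.toNat : Int) - 48)

def productSum_alt (number : Int) : Int :=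
  (pvBDigits number).prod - (pvBDigits number).sum

-- ===== PRECONDITION & SPEC =====
-- For number == 0, A's loop never runs and it returns its initial prod - total = 1,
-- while B sees the digit list [0] and returns 0, the actual product-minus-sum of the
-- digits of 0.
def D_productSum (number : Int) : Prop := number = 0
instance (number : Int) : Decidable (D_productSum number) := by unfold D_productSum; infer_instance
def Spec_productSum (number : Int) (out : Int) : Prop := ¬ D_productSum number → out = productSum_alt number
instance (number : Int) (out : Int) : Decidable (Spec_productSum number out) := by unfold Spec_productSum; infer_instance
def pvDiffWitness_productSum : Int := 0
def pvDiffWitnessOut_productSum : Int × Int := (1, 0)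

-- ===== CLAIM (what is proved, stated in full; the proofs are below) =====
def Claim_unchanged_productSum : Prop := ∀ (number : Int), Dom_productSum number → Spec_productSum number (productSum number)
def Claim_changed_productSum : Prop := Dom_productSum (pvDiffWitness_productSum) ∧ D_productSum (pvDiffWitness_productSum) ∧ productSum (pvDiffWitness_productSum) = pvDiffWitnessOut_productSum.1 ∧ productSum_alt (pvDiffWitness_productSum) = pvDiffWitnessOut_productSum.2 ∧ pvDiffWitnessOut_productSum.1 ≠ pvDiffWitnessOut_productSum.2
def Claim_exact_productSum : Prop := ∀ (number : Int), Dom_productSum number → D_productSum number → productSum number ≠ productSum_alt number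

-- ===== LEMMAS AND PROOFS =====
-- The little-endian digit list of m (empty for m = 0), matching A's loop order.
def pvDigits (m : Nat) : List Nat :=
  if m = 0 then []
  else m % 10 :: pvDigits (m / 10)
decreasing_by exact Nat.div_lt_self (Nat.pos_of_ne_zero (by assumption)) (by norm_num)

theorem productSumLoopA_eq (m : Nat) : ∀ (total prod : Int),
    productSumLoopA m total prod
      = prod * ((pvDigits m).map Int.ofNat).prod - (total + ((pvDigits m).map Int.ofNat).sum) := by
  induction m using Nat.strong_induction_on with
  | _ m ih =>
    intro total prod
    rw [productSumLoopA, pvDigits]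
    by_cases h : m = 0
    · simp [h]
    · simp only [h, if_false, List.map_cons, List.prod_cons, List.sum_cons]
      rw [ih (m / 10) (Nat.div_lt_self (Nat.pos_of_ne_zero h) (by norm_num))]
      simp only [Int.ofNat_eq_natCast]
      ring

-- Core's fuel-based printer produces exactly the reversed little-endian digit chars.
theorem toDigitsCore_eq (m : Nat) : ∀ (f : Nat) (acc : List Char), m ≠ 0 → m ≤ f + 1 →
    Nat.toDigitsCore 10 (f + 1) m acc = ((pvDigits m).map Nat.digitChar).reverse ++ acc := by
  induction m using Nat.strong_induction_on with
  | _ m ih =>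
    intro f acc hm hle
    rw [pvDigits]
    simp only [hm, if_false, Nat.toDigitsCore, List.map_cons, List.reverse_cons]
    by_cases h10 : m / 10 = 0
    · simp [h10, pvDigits]
    · have hm10 : 10 ≤ m := by
        by_contra h
        exact h10 (Nat.div_eq_of_lt (by omega))
      have hflt : m / 10 < m := Nat.div_lt_self (by omega) (by norm_num)
      obtain ⟨f', rfl⟩ : ∃ f', f = f' + 1 := ⟨f - 1, by omega⟩
      rw [if_neg h10, ih (m / 10) hflt f' _ h10 (by omega)]
      simp

theorem digitChar_val (d : Nat) (hd : d < 10) :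
    ((Nat.digitChar d).toNat : Int) - 48 = (d : Int) := by
  interval_cases d <;> decide

theorem pvDigits_lt (m : Nat) : ∀ d ∈ pvDigits m, d < 10 := by
  induction m using Nat.strong_induction_on with
  | _ m ih =>
    intro d hd
    rw [pvDigits] at hd
    by_cases h : m = 0
    · simp [h] at hd
    · simp only [h, if_false, List.mem_cons] at hd
      rcases hd with rfl | hd
      · exact Nat.mod_lt _ (by norm_num)
      · exact ih (m / 10) (Nat.div_lt_self (Nat.pos_of_ne_zero h) (by norm_num)) d hd

theorem alt_eq (number : Int) (h : number ≠ 0) :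
    productSum_alt number
      = ((pvDigits number.natAbs).map Int.ofNat).prod - ((pvDigits number.natAbs).map Int.ofNat).sum := by
  have hn : number.natAbs ≠ 0 := fun h0 => h (Int.natAbs_eq_zero.mp h0)
  unfold productSum_alt pvBDigits
  have htc : PySem.Int.toChars ((number.natAbs : Int))
      = ((pvDigits number.natAbs).map Nat.digitChar).reverse := by
    unfold PySem.Int.toChars
    rw [if_neg (not_lt.mpr (Int.natCast_nonneg _)), Int.toNat_natCast, Nat.toDigits,
      toDigitsCore_eq number.natAbs number.natAbs [] hn (by omega)]
    simp
  rw [htc, List.map_reverse, List.prod_reverse, List.sum_reverse, List.map_map]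
  congr 2 <;>
  · apply List.map_congr_left
    intro d hd
    simpa using digitChar_val d (pvDigits_lt _ d hd)

-- ===== VERDICT (by name: the statement is the Claim_ definition above) =====
theorem productSum_spec : Claim_unchanged_productSum := by
  intro number _ hD
  have h0 : number ≠ 0 := fun h => hD (by unfold D_productSum; exact h)
  unfold productSum
  rw [productSumLoopA_eq, alt_eq number h0]
  ring

theorem pvA_at_zero : productSum 0 = 1 := by
  unfold productSum
  norm_num
  rw [productSumLoopA]
  norm_num

theorem pvB_at_zero : productSum_alt 0 = 0 := by
  unfold productSum_alt pvBDigits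
  simp [PySem.Int.toChars, Nat.toDigits, Nat.toDigitsCore]

theorem productSum_changed : Claim_changed_productSum := by
  unfold Claim_changed_productSum pvDiffWitness_productSum pvDiffWitnessOut_productSum
  refine ⟨by decide, by decide, pvA_at_zero, pvB_at_zero, by decide⟩

theorem productSum_tight : Claim_exact_productSum := by
  intro number _ hD
  unfold D_productSum at hD
  subst hD
  rw [pvA_at_zero, pvB_at_zero]
  decide
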